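-- pv_equiv track=rewrite | github.com/tibbdc/scp4ssd | features/CpG_island.py | write_out
-- ===== SOURCE A (Python) =====
-- def write_out(seq):
-- 	cpgs=[]
-- 	i=1
-- 	length=len(seq)
-- 	while i<length:
-- 		if seq[i][1]=='+':
-- 			j=i+1
-- 			while(j<length):
-- 				if(seq[j][1]=='-'):
-- 					break
-- 				j+=1
-- 			cpgs.append([i,j-1])
-- 			i=j
-- 		i+=1
-- 	count = len(cpgs)
-- 	return count
-- ===== SOURCE B (Python) =====
-- def write_out(seq):
--     count = 0
--     in_run = False
--     for x in seq[1:]: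
--         c = x[1]
--         if c == '-':
--             in_run = False
--         elif c == '+' and not in_run:
--             count += 1
--             in_run = True
--     return count
-- ===== Notes on version B (the rewrite author's own statement) =====
-- stated objective: simpler
-- what changed: Replaced the nested while loops with index jumps (i=j skip-ahead) by a single flat pass over seq[1:] that keeps one boolean in_run flag, counting only the first '+' of each '-'-delimited run.
import Mathlib
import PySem

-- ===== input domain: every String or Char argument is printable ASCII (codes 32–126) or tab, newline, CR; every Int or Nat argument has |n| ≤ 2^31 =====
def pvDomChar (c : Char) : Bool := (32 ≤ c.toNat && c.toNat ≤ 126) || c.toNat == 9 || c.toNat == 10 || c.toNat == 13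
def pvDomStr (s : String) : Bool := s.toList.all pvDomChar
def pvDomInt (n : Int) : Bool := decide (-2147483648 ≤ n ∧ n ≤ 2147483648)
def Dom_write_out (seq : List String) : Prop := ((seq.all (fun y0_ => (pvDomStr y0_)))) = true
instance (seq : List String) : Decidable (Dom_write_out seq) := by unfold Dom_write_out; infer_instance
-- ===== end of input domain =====

-- B changes only the decomposition: one flat pass with a boolean flag instead of
-- nested index loops with skip-ahead; return-value equivalence on Pre_ is proved.

-- ===== PORT A =====
-- seq[i][1] as a Char; the ' ' default is only reached outside Pre_write_out
def pvGet1 (seq : List String) (i : Nat) : Char :=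
  (seq.getD i "").toList.getD 1 ' '

-- inner 'while j<length: if seq[j][1]=='-': break; j+=1'
def pvInner (seq : List String) (length j : Nat) : Nat :=
  if j < length then
    if pvGet1 seq j = '-' then j else pvInner seq length (j + 1)
  else j
termination_by length - j

theorem pvInner_ge (seq : List String) (length j : Nat) : j ≤ pvInner seq length j := by
  unfold pvInner
  split
  · split
    · exact le_refl j
    · exact le_trans (Nat.le_succ j) (pvInner_ge seq length (j + 1))
  · exact le_refl j
termination_by length - j

-- outer while loop; cpgs accumulates the [i, j-1] pairs exactly as A does
def pvOuter (seq : List String) (length i : Nat) (cpgs : List (Int × Int)) :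
    List (Int × Int) :=
  if i < length then
    if pvGet1 seq i = '+' then
      let j := pvInner seq length (i + 1)
      pvOuter seq length (j + 1) (cpgs ++ [((i : Int), (j : Int) - 1)])
    else pvOuter seq length (i + 1) cpgs
  else cpgs
termination_by length - i
decreasing_by
  · have := pvInner_ge seq length (i + 1); omega
  · omega

def write_out (seq : List String) : Int :=
  ((pvOuter seq seq.length 1 []).length : Int)

-- ===== PORT B =====
-- one step of the flat loop: state = (count, in_run)
def pvStep (st : Int × Bool) (c : Char) : Int × Bool :=
  if c = '-' then (st.1, false)
  else if c = '+' ∧ st.2 = false then (st.1 + 1, true)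
  else st

def write_out_alt (seq : List String) : Int :=
  (((seq.drop 1).map (fun x => x.toList.getD 1 ' ')).foldl pvStep (0, false)).1

-- ===== PRECONDITION & SPEC =====
-- Pre_ excludes exactly the inputs where Python A raises IndexError: some string in
-- seq[1:] has fewer than 2 characters (B raises there too).
def Pre_write_out (seq : List String) : Prop :=
  ∀ s ∈ seq.drop 1, 2 ≤ s.toList.length
instance (seq : List String) : Decidable (Pre_write_out seq) := by
  unfold Pre_write_out; infer_instance

def pvWitness_write_out : List String := ["xx", "A+", "B-", "C+"]

def Spec_write_out (seq : List String) (out : Int) : Prop := out = write_out_alt seq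
instance (seq : List String) (out : Int) : Decidable (Spec_write_out seq out) := by
  unfold Spec_write_out; infer_instance

-- ===== CLAIM (what is proved, stated in full; the proofs are below) =====
def Claim_equal_write_out : Prop :=
  ∀ (seq : List String), Dom_write_out seq → Pre_write_out seq →
    Spec_write_out seq (write_out seq)

-- ===== LEMMAS AND PROOFS =====

-- reference count over the (already extracted) character list
def pvAfterDash : List Char → List Char
  | [] => []
  | c :: t => if c = '-' then t else pvAfterDash t

theorem pvAfterDash_length_le (l : List Char) : (pvAfterDash l).length ≤ l.length := by
  induction l with
  | nil => simp [pvAfterDash]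
  | cons c t ih =>
    simp only [pvAfterDash]
    split
    · simp
    · simpa using Nat.le_succ_of_le ih

def pvCnt : List Char → Nat
  | [] => 0
  | c :: t =>
    if c = '+' then 1 + pvCnt (pvAfterDash t) else pvCnt t
termination_by l => l.length
decreasing_by
  · simpa using Nat.lt_succ_of_le (pvAfterDash_length_le t)
  · simp

-- suffix of extracted characters from index i on
def pvSfx (seq : List String) (i : Nat) : List Char :=
  (seq.drop i).map (fun x => x.toList.getD 1 ' ')

theorem pvSfx_cons (seq : List String) (i : Nat) (h : i < seq.length) :
    pvSfx seq i = pvGet1 seq i :: pvSfx seq (i + 1) := by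
  unfold pvSfx pvGet1
  rw [List.drop_eq_getElem_cons h, List.map_cons]
  congr 1
  simp [List.getD, List.getElem?_eq_getElem h]

theorem pvSfx_nil (seq : List String) (i : Nat) (h : seq.length ≤ i) :
    pvSfx seq i = [] := by
  unfold pvSfx
  rw [List.drop_eq_nil_of_le h]
  rfl

theorem pvInner_sfx (seq : List String) (j : Nat) :
    pvSfx seq (pvInner seq seq.length j + 1) = pvAfterDash (pvSfx seq j) := by
  unfold pvInner
  split
  · rename_i h
    rw [pvSfx_cons seq j h]
    by_cases hd : pvGet1 seq j = '-'
    · rw [if_pos hd]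
      simp only [pvAfterDash, if_pos hd]
    · rw [if_neg hd]
      simp only [pvAfterDash, if_neg hd]
      exact pvInner_sfx seq (j + 1)
  · rename_i h
    rw [pvSfx_nil seq j (by omega), pvSfx_nil seq _ (by omega)]
    simp [pvAfterDash]
termination_by seq.length - j

theorem pvOuter_cnt (seq : List String) (i : Nat) (cpgs : List (Int × Int)) :
    (pvOuter seq seq.length i cpgs).length = cpgs.length + pvCnt (pvSfx seq i) := by
  unfold pvOuter
  split
  · rename_i h
    rw [pvSfx_cons seq i h]
    by_cases hp : pvGet1 seq i = '+'
    · simp only [if_pos hp, pvCnt]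
      rw [pvOuter_cnt seq (pvInner seq seq.length (i + 1) + 1)]
      rw [pvInner_sfx seq (i + 1)]
      simp
      omega
    · simp only [if_neg hp, pvCnt]
      exact pvOuter_cnt seq (i + 1) cpgs
  · rename_i h
    rw [pvSfx_nil seq i (by omega)]
    simp [pvCnt]
termination_by seq.length - i
decreasing_by
  · have := pvInner_ge seq seq.length (i + 1); omega
  · omega

theorem pvFold_cnt (l : List Char) (k : Int) :
    (l.foldl pvStep (k, false)).1 = k + pvCnt l ∧
      (l.foldl pvStep (k, true)).1 = k + pvCnt (pvAfterDash l) := by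
  induction l generalizing k with
  | nil => simp [pvCnt, pvAfterDash]
  | cons c t ih =>
    constructor
    · by_cases hp : c = '+'
      · have hd : ¬ c = '-' := by rw [hp]; decide
        simp only [List.foldl_cons, pvStep, if_neg hd]
        rw [if_pos (show c = '+' ∧ True from ⟨hp, trivial⟩)]
        simp only [pvCnt, if_pos hp]
        rw [(ih (k + 1)).2]
        push_cast
        ring
      · by_cases hd : c = '-'
        · simp only [List.foldl_cons, pvStep, if_pos hd]
          simp only [pvCnt, if_neg hp]
          exact (ih k).1
        · simp only [List.foldl_cons, pvStep, if_neg hd]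
          rw [if_neg (fun h : c = '+' ∧ True => hp h.1)]
          simp only [pvCnt, if_neg hp]
          exact (ih k).1
    · by_cases hd : c = '-'
      · simp only [List.foldl_cons, pvStep, if_pos hd]
        simp only [pvAfterDash, if_pos hd]
        exact (ih k).1
      · have hnp : ¬ (c = '+' ∧ (true : Bool) = false) := fun h => by
          exact absurd h.2 (by decide)
        simp only [List.foldl_cons, pvStep, if_neg hd, if_neg hnp]
        simp only [pvAfterDash, if_neg hd]
        exact (ih k).2

-- ===== VERDICT (by name: the statement is the Claim_ definition above) =====
theorem write_out_spec : Claim_equal_write_out := by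
  intro seq _ _
  unfold Spec_write_out write_out write_out_alt
  rw [pvOuter_cnt seq 1 []]
  rw [(pvFold_cnt ((seq.drop 1).map (fun x => x.toList.getD 1 ' ')) 0).1]
  unfold pvSfx
  simp
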